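-- pv_equiv track=rewrite | github.com/vincehartono/master | Roulette/simulate_10k_games.py | analyze_color
-- ===== SOURCE A (Python) =====
-- RED_NUMBERS = {1, 3, 5, 7, 9, 12, 14, 16, 18, 19, 21, 23, 25, 27, 30, 32, 34, 36}
--
-- BLACK_NUMBERS = {2, 4, 6, 8, 10, 11, 13, 15, 17, 20, 22, 24, 26, 28, 29, 31, 33, 35}
--
-- def analyze_color(draws):
--     if not draws:
--         return (0, 0), "Either"
--
--     red_count = sum(1 for d in draws if d in RED_NUMBERS)
--     black_count = sum(1 for d in draws if d in BLACK_NUMBERS)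
--
--     drawn_red = any(d in RED_NUMBERS for d in draws)
--     drawn_black = any(d in BLACK_NUMBERS for d in draws)
--
--     recent_draws = draws[-4:] if len(draws) >= 4 else draws
--     recent_red = sum(1 for d in recent_draws if d in RED_NUMBERS)
--     recent_black = sum(1 for d in recent_draws if d in BLACK_NUMBERS)
--
--     if not drawn_red:
--         rec = "RED"
--     elif not drawn_black:
--         rec = "BLACK"
--     elif red_count < black_count:
--         rec = "RED"
--     elif black_count < red_count:
--         rec = "BLACK"
--     else:
--         if recent_red > recent_black:
--             rec = "RED"
--         elif recent_black > recent_red: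
--             rec = "BLACK"
--         else:
--             rec = "Either"
--
--     return (red_count, black_count), rec
-- ===== SOURCE B (Python) =====
-- RED_NUMBERS = {1, 3, 5, 7, 9, 12, 14, 16, 18, 19, 21, 23, 25, 27, 30, 32, 34, 36}
--
-- BLACK_NUMBERS = {2, 4, 6, 8, 10, 11, 13, 15, 17, 20, 22, 24, 26, 28, 29, 31, 33, 35}
--
-- def analyze_color(draws):
--     if not draws:
--         return (0, 0), "Either"
--     n = len(draws)
--     red = black = recent_red = recent_black = 0
--     for i, d in enumerate(draws):
--         if d in RED_NUMBERS:
--             red += 1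
--             if i >= n - 4:
--                 recent_red += 1
--         elif d in BLACK_NUMBERS:
--             black += 1
--             if i >= n - 4:
--                 recent_black += 1
--     if red == 0:
--         rec = "RED"
--     elif black == 0:
--         rec = "BLACK"
--     elif red < black:
--         rec = "RED"
--     elif black < red:
--         rec = "BLACK"
--     elif recent_red > recent_black:
--         rec = "RED"
--     elif recent_black > recent_red:
--         rec = "BLACK"
--     else:
--         rec = "Either"
--     return (red, black), rec
-- ===== Notes on version B (the rewrite author's own statement) =====
-- stated objective: simpler
-- what changed: Replaces A's five separate scans (two full counts, two any-scans, a slice plus two recent counts) with one indexed pass that maintains all four counters at once, deriving drawn_red/drawn_black as count > 0.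
import Mathlib
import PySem

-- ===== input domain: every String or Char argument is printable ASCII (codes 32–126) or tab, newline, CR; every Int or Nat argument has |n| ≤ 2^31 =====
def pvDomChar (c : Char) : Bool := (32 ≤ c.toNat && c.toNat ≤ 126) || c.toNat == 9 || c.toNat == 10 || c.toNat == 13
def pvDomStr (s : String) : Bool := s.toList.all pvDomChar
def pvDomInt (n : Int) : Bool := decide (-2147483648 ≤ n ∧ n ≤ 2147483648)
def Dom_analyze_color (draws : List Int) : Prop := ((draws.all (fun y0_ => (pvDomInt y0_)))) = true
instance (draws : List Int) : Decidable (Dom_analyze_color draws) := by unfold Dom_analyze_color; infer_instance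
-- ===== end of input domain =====

-- B merges A's five scans (two counts, two any-scans, slice + two recent counts) into one
-- indexed pass keeping four counters; objective: simpler.

-- ===== PORT A =====
def RED_NUMBERS : PySem.Set Int :=
  PySem.Set.ofList [1, 3, 5, 7, 9, 12, 14, 16, 18, 19, 21, 23, 25, 27, 30, 32, 34, 36]

def BLACK_NUMBERS : PySem.Set Int :=
  PySem.Set.ofList [2, 4, 6, 8, 10, 11, 13, 15, 17, 20, 22, 24, 26, 28, 29, 31, 33, 35]

def analyze_color (draws : List Int) : (Int × Int) × String :=
  if draws = [] then ((0, 0), "Either")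
  else
    let red_count : Int :=
      draws.foldl (fun acc d => if PySem.Set.contains RED_NUMBERS d then acc + 1 else acc) 0
    let black_count : Int :=
      draws.foldl (fun acc d => if PySem.Set.contains BLACK_NUMBERS d then acc + 1 else acc) 0
    let drawn_red : Bool := draws.any (fun d => PySem.Set.contains RED_NUMBERS d)
    let drawn_black : Bool := draws.any (fun d => PySem.Set.contains BLACK_NUMBERS d)
    let recent_draws : List Int :=
      if (draws.length : Int) ≥ 4 then PySem.List.slice draws (some (-4)) none else draws
    let recent_red : Int :=
      recent_draws.foldl (fun acc d => if PySem.Set.contains RED_NUMBERS d then acc + 1 else acc) 0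
    let recent_black : Int :=
      recent_draws.foldl (fun acc d => if PySem.Set.contains BLACK_NUMBERS d then acc + 1 else acc) 0
    let recm : String :=
      if ¬ drawn_red then "RED"
      else if ¬ drawn_black then "BLACK"
      else if red_count < black_count then "RED"
      else if black_count < red_count then "BLACK"
      else if recent_red > recent_black then "RED"
      else if recent_black > recent_red then "BLACK"
      else "Either"
    ((red_count, black_count), recm)

-- ===== PORT B =====
def pvStep (t : Int) (st : Int × Int × Int × Int) (p : Int × Int) : Int × Int × Int × Int :=
  if PySem.Set.contains RED_NUMBERS p.2 then
    if p.1 ≥ t then (st.1 + 1, st.2.1, st.2.2.1 + 1, st.2.2.2)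
    else (st.1 + 1, st.2.1, st.2.2.1, st.2.2.2)
  else if PySem.Set.contains BLACK_NUMBERS p.2 then
    if p.1 ≥ t then (st.1, st.2.1 + 1, st.2.2.1, st.2.2.2 + 1)
    else (st.1, st.2.1 + 1, st.2.2.1, st.2.2.2)
  else st

def analyze_color_alt (draws : List Int) : (Int × Int) × String :=
  if draws = [] then ((0, 0), "Either")
  else
    let n : Int := draws.length
    let st := (PySem.List.enumerate draws 0).foldl (pvStep (n - 4)) (0, 0, 0, 0)
    let red := st.1
    let black := st.2.1
    let recent_red := st.2.2.1
    let recent_black := st.2.2.2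
    let recm : String :=
      if red = 0 then "RED"
      else if black = 0 then "BLACK"
      else if red < black then "RED"
      else if black < red then "BLACK"
      else if recent_red > recent_black then "RED"
      else if recent_black > recent_red then "BLACK"
      else "Either"
    ((red, black), recm)

-- ===== PRECONDITION & SPEC =====
def Spec_analyze_color (draws : List Int) (out : (Int × Int) × String) : Prop := out = analyze_color_alt draws
instance (draws : List Int) (out : (Int × Int) × String) : Decidable (Spec_analyze_color draws out) := by unfold Spec_analyze_color; infer_instance

-- ===== CLAIM (what is proved, stated in full; the proofs are below) =====
def Claim_equal_analyze_color : Prop := ∀ (draws : List Int), Dom_analyze_color draws → Spec_analyze_color draws (analyze_color draws)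

-- ===== LEMMAS AND PROOFS =====

theorem red_not_black (d : Int) (h : d ∈ RED_NUMBERS) : d ∉ BLACK_NUMBERS := by
  simp [RED_NUMBERS, BLACK_NUMBERS, PySem.Set.ofList] at *
  rcases h with rfl|rfl|rfl|rfl|rfl|rfl|rfl|rfl|rfl|rfl|rfl|rfl|rfl|rfl|rfl|rfl|rfl|rfl <;> decide

theorem count_red (xs : List Int) :
    xs.foldl (fun acc d => if PySem.Set.contains RED_NUMBERS d then acc + 1 else acc) 0
      = (xs.countP (fun d => PySem.Set.contains RED_NUMBERS d) : Int) := by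
  simpa using PySem.List.foldl_if_add_one (fun d => PySem.Set.contains RED_NUMBERS d) xs 0

theorem count_black (xs : List Int) :
    xs.foldl (fun acc d => if PySem.Set.contains BLACK_NUMBERS d then acc + 1 else acc) 0
      = (xs.countP (fun d => PySem.Set.contains BLACK_NUMBERS d) : Int) := by
  simpa using PySem.List.foldl_if_add_one (fun d => PySem.Set.contains BLACK_NUMBERS d) xs 0

-- loop invariant for B's single pass
theorem fold_step (t : Int) (xs : List Int) :
    ∀ (k : Int) (r b rr rb : Int),
      (PySem.List.enumerate xs k).foldl (pvStep t) (r, b, rr, rb)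
        = (r + (xs.countP (fun d => PySem.Set.contains RED_NUMBERS d) : Int),
           b + (xs.countP (fun d => PySem.Set.contains BLACK_NUMBERS d) : Int),
           rr + ((xs.drop (t - k).toNat).countP (fun d => PySem.Set.contains RED_NUMBERS d) : Int),
           rb + ((xs.drop (t - k).toNat).countP (fun d => PySem.Set.contains BLACK_NUMBERS d) : Int)) := by
  induction xs with
  | nil => intro k r b rr rb; simp [PySem.List.enumerate]
  | cons x xs ih =>
    intro k r b rr rb
    rw [PySem.List.enumerate_cons, List.foldl_cons, ih (k + 1)]
    by_cases hk : k ≥ t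
    · have h0 : (t - k).toNat = 0 := by omega
      have h1 : (t - (k + 1)).toNat = 0 := by omega
      by_cases hr : x ∈ RED_NUMBERS
      · have hb := red_not_black x hr
        simp [pvStep, hr, hb, hk, h0, h1, List.countP_cons]
        omega
      · by_cases hb : x ∈ BLACK_NUMBERS
        · simp [pvStep, hr, hb, hk, h0, h1, List.countP_cons]
          omega
        · simp [pvStep, hr, hb, hk, h0, h1, List.countP_cons]
    · have h0 : (t - k).toNat = (t - (k + 1)).toNat + 1 := by omega
      have hdrop : (x :: xs).drop (t - k).toNat = xs.drop (t - (k + 1)).toNat := by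
        rw [h0]; simp
      by_cases hr : x ∈ RED_NUMBERS
      · have hb := red_not_black x hr
        simp [pvStep, hr, hb, hk, hdrop, List.countP_cons]
        omega
      · by_cases hb : x ∈ BLACK_NUMBERS
        · simp [pvStep, hr, hb, hk, hdrop, List.countP_cons]
          omega
        · simp [pvStep, hr, hb, hk, hdrop, List.countP_cons]

theorem recent_eq (draws : List Int) :
    (if (draws.length : Int) ≥ 4 then PySem.List.slice draws (some (-4)) none else draws)
      = draws.drop ((draws.length : Int) - 4).toNat := by
  by_cases h : (draws.length : Int) ≥ 4
  · rw [if_pos h, PySem.List.slice_from_neg_ofNat draws 4 (by omega)]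
    congr 1
    omega
  · rw [if_neg h]
    have : ((draws.length : Int) - 4).toNat = 0 := by omega
    simp [this]

theorem any_iff_countP (xs : List Int) (p : Int → Bool) :
    (xs.any p = false) ↔ ((xs.countP p : Int) = 0) := by
  simp [List.any_eq_false, List.countP_eq_zero]

-- ===== VERDICT (by name: the statement is the Claim_ definition above) =====
theorem analyze_color_spec : Claim_equal_analyze_color := by
  intro draws _
  unfold Spec_analyze_color analyze_color analyze_color_alt
  by_cases hnil : draws = []
  · simp [hnil]
  · rw [if_neg hnil, if_neg hnil]
    simp only [fold_step, count_red, count_black, recent_eq, zero_add, Int.sub_zero]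
    have hR := any_iff_countP draws (fun d => PySem.Set.contains RED_NUMBERS d)
    have hB := any_iff_countP draws (fun d => PySem.Set.contains BLACK_NUMBERS d)
    by_cases hdr : draws.any (fun d => PySem.Set.contains RED_NUMBERS d)
    <;> by_cases hdb : draws.any (fun d => PySem.Set.contains BLACK_NUMBERS d)
    <;> simp [hdr, hdb] at hR hB
    <;> simp [hdr, hdb, hR, hB]
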